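-- pv_equiv track=rewrite | github.com/weixx2/gog | code/rgb/codeToRGB.py | codeToRgb
-- ===== SOURCE A (Python) =====
-- JavaKeyWords = ["abstract","assert","boolean","break","byte","case","catch","char","class",
--                 "continue","default","do","double","else","enum","extends","final","finally",
--                 "float","for","if","implements","import","int","interface","instanceof","long",
--                 "native","new","package","private","protected","public","return","short","static",
--                 "strictfp","super","switch","synchronized","this","throw","throws","transient",
--                 "try","void","volatile","while","true","false","null","goto","const"]
--
-- JavaOperators = ["+","-","*","/","%","~","!","++","--","==","!=",">",
--                  "<",">=","<=","&","~","|","^","&&","||","=","+=","-=",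
--                  "*=","/=","&=","^=","|=","<<=",">>=","instanceof"]
--
-- JavaOperatorsConnect = ["(",")","{","}",";",":","\""]
--
-- def codeToRgb(code):
--     rgbResult = ""
--     line = code.strip("\n").split(" ")
--     for i in line:
--         if(i in JavaKeyWords):
--             rgbResult += "255 0 0 "*len(i)       #关键字 红色
--         elif(i in JavaOperators):
--             rgbResult += "251 255 0 " * len(i)   #运算符 黄色
--         else:                                   #没有空格间隔 需逐字分析
--             flag = False  # 表示没有引号
--             for k in i:
--                 if(flag):
--                     rgbResult += "0 255 0 "        #输出内容  绿色
--                 elif(k in JavaOperatorsConnect):  #连接运算符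
--                     rgbResult += "251 255 0 "      #运算符 黄色
--                     if(k == "\""):                #输出语句  绿色
--                         flag = ~flag
--                 else:                             #普通代码  蓝色
--                     rgbResult += "0 255 255 "
--     return  rgbResult
-- ===== SOURCE B (Python) =====
-- JavaKeyWords = ["abstract","assert","boolean","break","byte","case","catch","char","class",
--                 "continue","default","do","double","else","enum","extends","final","finally",
--                 "float","for","if","implements","import","int","interface","instanceof","long",
--                 "native","new","package","private","protected","public","return","short","static",
--                 "strictfp","super","switch","synchronized","this","throw","throws","transient",
--                 "try","void","volatile","while","true","false","null","goto","const"]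
--
-- JavaOperators = ["+","-","*","/","%","~","!","++","--","==","!=",">",
--                  "<",">=","<=","&","~","|","^","&&","||","=","+=","-=",
--                  "*=","/=","&=","^=","|=","<<=",">>=","instanceof"]
--
-- JavaOperatorsConnect = ["(",")","{","}",";",":","\""]
--
--
-- def _classify(c):
--     # one char before the first quote: yellow connector or blue plain code
--     return "251 255 0 " if c in JavaOperatorsConnect else "0 255 255 "
--
--
-- def _plain(tok):
--     # token that is neither a keyword nor an operator: everything after the
--     # first '"' is green (the quote itself yellow), chars before it classified
--     q = tok.find('"')
--     if q == -1:
--         return "".join(_classify(c) for c in tok)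
--     return ("".join(_classify(c) for c in tok[:q])
--             + "251 255 0 "
--             + "0 255 0 " * (len(tok) - q - 1))
--
--
-- def _token(tok):
--     if tok in JavaKeyWords:
--         return "255 0 0 " * len(tok)
--     if tok in JavaOperators:
--         return "251 255 0 " * len(tok)
--     return _plain(tok)
--
--
-- def codeToRgb(code):
--     return "".join(_token(tok) for tok in code.strip("\n").split(" "))
-- ===== Notes on version B (the rewrite author's own statement) =====
-- stated objective: alternative
-- what changed: A's per-character loop with a never-reset quote flag is replaced by locating the first double-quote of each token once (str.find) and emitting the three colour segments directly: classified chars before the quote, one yellow block for the quote, green blocks for every remaining char.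
import Mathlib
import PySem

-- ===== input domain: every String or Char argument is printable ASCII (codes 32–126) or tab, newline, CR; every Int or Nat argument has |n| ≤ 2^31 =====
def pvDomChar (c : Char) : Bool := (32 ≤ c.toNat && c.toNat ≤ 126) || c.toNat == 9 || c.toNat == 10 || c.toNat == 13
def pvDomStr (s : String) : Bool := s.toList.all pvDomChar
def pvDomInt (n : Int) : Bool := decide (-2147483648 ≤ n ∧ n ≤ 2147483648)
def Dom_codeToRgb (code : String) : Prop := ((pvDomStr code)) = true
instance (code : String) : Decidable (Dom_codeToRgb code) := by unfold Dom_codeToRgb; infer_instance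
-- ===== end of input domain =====

-- B replaces A's stateful per-character flag loop by locating the first '"' of a
-- token once and emitting the three colour segments directly (objective: alternative decomposition).

def JavaKeyWords : List String :=
  ["abstract","assert","boolean","break","byte","case","catch","char","class",
   "continue","default","do","double","else","enum","extends","final","finally",
   "float","for","if","implements","import","int","interface","instanceof","long",
   "native","new","package","private","protected","public","return","short","static",
   "strictfp","super","switch","synchronized","this","throw","throws","transient",
   "try","void","volatile","while","true","false","null","goto","const"]

def JavaOperators : List String :=
  ["+","-","*","/","%","~","!","++","--","==","!=",">",
   "<",">=","<=","&","~","|","^","&&","||","=","+=","-=",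
   "*=","/=","&=","^=","|=","<<=",">>=","instanceof"]

def JavaOperatorsConnect : List String := ["(",")","{","}",";",":","\""]

-- ===== PORT A =====
-- body of A's inner 'for k in i' loop (the flag-carrying state machine)
def codeToRgbStep (st : List Char × Bool) (k : Char) : List Char × Bool :=
  if st.2 then (st.1 ++ "0 255 0 ".toList, st.2)
  else if JavaOperatorsConnect.contains (String.ofList [k]) then
    if String.ofList [k] == "\"" then (st.1 ++ "251 255 0 ".toList, true)
    else (st.1 ++ "251 255 0 ".toList, st.2)
  else (st.1 ++ "0 255 255 ".toList, st.2)

def codeToRgb (code : String) : String :=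
  let line := PySem.Chars.splitOn (PySem.Str.stripChars code "\n").toList " ".toList
  String.ofList (line.foldl (fun acc i =>
    if JavaKeyWords.contains (String.ofList i) then
      acc ++ PySem.List.pyRepeat "255 0 0 ".toList (i.length : Int)
    else if JavaOperators.contains (String.ofList i) then
      acc ++ PySem.List.pyRepeat "251 255 0 ".toList (i.length : Int)
    else (i.foldl codeToRgbStep (acc, false)).1) [])

-- ===== PORT B =====
-- Source B's _classify
def codeToRgbClassify (c : Char) : List Char :=
  if JavaOperatorsConnect.contains (String.ofList [c]) then "251 255 0 ".toList
  else "0 255 255 ".toList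

-- Source B's _plain: split the token at the first '"' and emit the segments directly
def codeToRgbPlain (cs : List Char) : List Char :=
  let q := PySem.Chars.find cs ['"']
  if q = -1 then cs.flatMap codeToRgbClassify
  else (PySem.List.slice cs none (some q)).flatMap codeToRgbClassify
       ++ "251 255 0 ".toList
       ++ PySem.List.pyRepeat "0 255 0 ".toList ((cs.length : Int) - q - 1)

-- Source B's _token
def codeToRgbTok (i : List Char) : List Char :=
  if JavaKeyWords.contains (String.ofList i) then
    PySem.List.pyRepeat "255 0 0 ".toList (i.length : Int)
  else if JavaOperators.contains (String.ofList i) then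
    PySem.List.pyRepeat "251 255 0 ".toList (i.length : Int)
  else codeToRgbPlain i

def codeToRgb_alt (code : String) : String :=
  String.ofList
    ((PySem.Chars.splitOn (PySem.Str.stripChars code "\n").toList " ".toList).flatMap codeToRgbTok)

-- ===== PRECONDITION & SPEC =====
def Spec_codeToRgb (code : String) (out : String) : Prop := out = codeToRgb_alt code
instance (code : String) (out : String) : Decidable (Spec_codeToRgb code out) := by unfold Spec_codeToRgb; infer_instance

-- ===== CLAIM (what is proved, stated in full; the proofs are below) =====
def Claim_equal_codeToRgb : Prop := ∀ (code : String), Dom_codeToRgb code → Spec_codeToRgb code (codeToRgb code)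

-- ===== LEMMAS AND PROOFS =====

theorem pyRepeat_zero {α : Type} (xs : List α) : PySem.List.pyRepeat xs (0 : Int) = [] := by
  simp [PySem.List.pyRepeat]

theorem pyRepeat_succ {α : Type} (xs : List α) (n : Nat) :
    PySem.List.pyRepeat xs ((n : Int) + 1) = xs ++ PySem.List.pyRepeat xs (n : Int) := by
  simp [PySem.List.pyRepeat, List.replicate_succ]

theorem ofList_singleton_inj (c d : Char) : String.ofList [c] = String.ofList [d] ↔ c = d := by
  constructor
  · intro h
    have := congrArg String.toList h
    simpa using this
  · intro h; rw [h]

-- once the flag is set, every remaining character is green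
theorem flagTrue (cs : List Char) (acc : List Char) :
    cs.foldl codeToRgbStep (acc, true)
      = (acc ++ PySem.List.pyRepeat "0 255 0 ".toList (cs.length : Int), true) := by
  induction cs generalizing acc with
  | nil => simp [pyRepeat_zero]
  | cons c cs ih =>
      rw [List.foldl_cons,
        show codeToRgbStep (acc, true) c = (acc ++ "0 255 0 ".toList, true) from rfl, ih]
      simp only [List.length_cons]
      push_cast
      rw [show ((cs.length : Int) + 1) = ((cs.length : Int) + 1) from rfl, pyRepeat_succ]
      simp

theorem find_cons_self (cs : List Char) : PySem.Chars.find ('"' :: cs) ['"'] = 0 := by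
  have hinf : ['"'] <:+: ('"' :: cs) := ⟨[], cs, rfl⟩
  have h0 : 0 ≤ PySem.Chars.find ('"' :: cs) ['"'] :=
    (PySem.Chars.find_nonneg_iff _ _).mpr hinf
  obtain ⟨hpre, hmin⟩ := PySem.Chars.find_spec h0
  by_contra hne
  have hpos : 0 < (PySem.Chars.find ('"' :: cs) ['"']).toNat := by omega
  exact hmin 0 hpos ⟨cs, rfl⟩

theorem singleton_infix_iff (a : Char) (l : List Char) : [a] <:+: l ↔ a ∈ l := by
  constructor
  · rintro ⟨s, t, rfl⟩; simp
  · intro h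
    obtain ⟨s, t, rfl⟩ := List.append_of_mem h
    exact ⟨s, t, by simp⟩

theorem find_cons_ne (c : Char) (cs : List Char) (hc : c ≠ '"') :
    PySem.Chars.find (c :: cs) ['"']
      = if PySem.Chars.find cs ['"'] = -1 then -1 else PySem.Chars.find cs ['"'] + 1 := by
  by_cases h : PySem.Chars.find cs ['"'] = -1
  · rw [if_pos h]
    have hni : ¬ ['"'] <:+: cs := (PySem.Chars.find_eq_neg_one_iff _ _).mp h
    rw [PySem.Chars.find_eq_neg_one_iff]
    intro hinf
    have : '"' ∈ c :: cs := (singleton_infix_iff _ _).mp hinf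
    rcases List.mem_cons.mp this with h1 | h2
    · exact hc h1.symm
    · exact hni ((singleton_infix_iff _ _).mpr h2)
  · rw [if_neg h]
    have hq0 : 0 ≤ PySem.Chars.find cs ['"'] := by
      have := PySem.Chars.neg_one_le_find cs ['"']
      omega
    obtain ⟨hpre, hmin⟩ := PySem.Chars.find_spec hq0
    have hmem : '"' ∈ cs := by
      have : ['"'] <:+: cs := (PySem.Chars.find_ne_neg_one_iff _ _).mp h
      exact (singleton_infix_iff _ _).mp this
    have hinf : ['"'] <:+: (c :: cs) := (singleton_infix_iff _ _).mpr (List.mem_cons_of_mem _ hmem)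
    have hm0 : 0 ≤ PySem.Chars.find (c :: cs) ['"'] := (PySem.Chars.find_nonneg_iff _ _).mpr hinf
    obtain ⟨hpre', hmin'⟩ := PySem.Chars.find_spec hm0
    obtain ⟨m, hmeq⟩ : ∃ m : Nat, PySem.Chars.find (c :: cs) ['"'] = (m : Int) :=
      ⟨(PySem.Chars.find (c :: cs) ['"']).toNat, by omega⟩
    obtain ⟨k, hkeq⟩ : ∃ k : Nat, PySem.Chars.find cs ['"'] = (k : Int) :=
      ⟨(PySem.Chars.find cs ['"']).toNat, by omega⟩
    rw [hmeq] at hpre' hmin'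
    rw [hkeq] at hpre hmin
    simp only [Int.toNat_natCast] at hpre hmin hpre' hmin'
    have hmpos : 0 < m := by
      by_contra hz
      have hz0 : m = 0 := by omega
      rw [hz0] at hpre'
      obtain ⟨t, ht⟩ := hpre'
      simp at ht
      exact hc ht.1.symm
    -- prefix at m in c::cs means prefix at m-1 in cs
    have hdrop : List.drop m (c :: cs) = List.drop (m - 1) cs := by
      conv_lhs => rw [show m = (m - 1) + 1 by omega]
      simp
    have hk_le : k ≤ m - 1 := by
      by_contra hlt
      exact hmin (m - 1) (by omega) (hdrop ▸ hpre')
    have hm_le : m ≤ k + 1 := by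
      by_contra hlt
      have hdk : List.drop (k + 1) (c :: cs) = List.drop k cs := by simp
      exact hmin' (k + 1) (by omega) (hdk ▸ hpre)
    rw [hmeq, hkeq]
    omega

theorem step_ne (acc : List Char) (c : Char) (hc : c ≠ '"') :
    codeToRgbStep (acc, false) c = (acc ++ codeToRgbClassify c, false) := by
  have hq : (String.ofList [c] == "\"") = false := by
    simp only [beq_eq_false_iff_ne, ne_eq]
    intro h
    exact hc ((ofList_singleton_inj c '"').mp h)
  unfold codeToRgbStep codeToRgbClassify
  simp only [hq]
  split_ifs <;> simp_all

theorem plainEq (cs : List Char) (acc : List Char) :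
    (cs.foldl codeToRgbStep (acc, false)).1 = acc ++ codeToRgbPlain cs := by
  induction cs generalizing acc with
  | nil => simp [codeToRgbPlain, show PySem.Chars.find [] ['"'] = -1 from by decide]
  | cons c cs ih =>
      by_cases hc : c = '"'
      · subst hc
        have hstep : codeToRgbStep (acc, false) '"' = (acc ++ "251 255 0 ".toList, true) := by
          unfold codeToRgbStep
          norm_num [JavaOperatorsConnect]
        simp only [List.foldl_cons, hstep, flagTrue]
        unfold codeToRgbPlain
        rw [find_cons_self]
        norm_num
        rw [show ((0 : Int) = ((0 : Nat) : Int)) from rfl, PySem.List.slice_to_natCast]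
        simp
      · simp only [List.foldl_cons, step_ne acc c hc, ih]
        unfold codeToRgbPlain
        rw [find_cons_ne c cs hc]
        by_cases h : PySem.Chars.find cs ['"'] = -1
        · simp [h]
        · have hq0 : 0 ≤ PySem.Chars.find cs ['"'] := by
            have := PySem.Chars.neg_one_le_find cs ['"']
            omega
          set q := PySem.Chars.find cs ['"'] with hqdef
          have hne1 : ¬ (q + 1 = -1) := by omega
          simp only [if_neg h, if_neg hne1]
          obtain ⟨k, hk⟩ : ∃ k : Nat, q = (k : Int) := ⟨q.toNat, by omega⟩
          rw [hk]
          rw [show ((k : Int) + 1) = (((k + 1 : Nat) : Int)) by push_cast; ring]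
          rw [PySem.List.slice_to_natCast, PySem.List.slice_to_natCast]
          simp only [List.take_succ_cons, List.flatMap_cons, List.length_cons]
          have harg : ((cs.length + 1 : Nat) : Int) - ((k + 1 : Nat) : Int) - 1
              = (cs.length : Int) - (k : Int) - 1 := by push_cast; ring
          rw [harg]
          simp [List.append_assoc]

theorem tokEq (i : List Char) (acc : List Char) :
    (if JavaKeyWords.contains (String.ofList i) then
      acc ++ PySem.List.pyRepeat "255 0 0 ".toList (i.length : Int)
    else if JavaOperators.contains (String.ofList i) then
      acc ++ PySem.List.pyRepeat "251 255 0 ".toList (i.length : Int)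
    else (i.foldl codeToRgbStep (acc, false)).1) = acc ++ codeToRgbTok i := by
  unfold codeToRgbTok
  by_cases h1 : JavaKeyWords.contains (String.ofList i) = true
  · rw [if_pos h1, if_pos h1]
  · rw [if_neg h1, if_neg h1]
    by_cases h2 : JavaOperators.contains (String.ofList i) = true
    · rw [if_pos h2, if_pos h2]
    · rw [if_neg h2, if_neg h2]
      exact plainEq i acc

-- ===== VERDICT (by name: the statement is the Claim_ definition above) =====
theorem foldTokens (toks : List (List Char)) :
    toks.foldl (fun acc i =>
      if JavaKeyWords.contains (String.ofList i) then
        acc ++ PySem.List.pyRepeat "255 0 0 ".toList (i.length : Int)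
      else if JavaOperators.contains (String.ofList i) then
        acc ++ PySem.List.pyRepeat "251 255 0 ".toList (i.length : Int)
      else (i.foldl codeToRgbStep (acc, false)).1) []
    = toks.flatMap codeToRgbTok := by
  have hfun : (fun (acc : List Char) (i : List Char) =>
      if JavaKeyWords.contains (String.ofList i) then
        acc ++ PySem.List.pyRepeat "255 0 0 ".toList (i.length : Int)
      else if JavaOperators.contains (String.ofList i) then
        acc ++ PySem.List.pyRepeat "251 255 0 ".toList (i.length : Int)
      else (i.foldl codeToRgbStep (acc, false)).1)
    = (fun acc i => acc ++ codeToRgbTok i) := by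
    funext acc i; exact tokEq i acc
  rw [hfun, PySem.List.foldl_append_eq_flatMap]
  simp

theorem codeToRgb_spec : Claim_equal_codeToRgb := by
  unfold Claim_equal_codeToRgb
  intro code _
  unfold Spec_codeToRgb codeToRgb codeToRgb_alt
  dsimp only
  rw [foldTokens]
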